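-- pv_equiv track=rewrite | github.com/thetunr/Scatella | MUSCLE/refinement.py | compute_gap_intervals
-- ===== SOURCE A (Python) =====
-- def compute_gap_intervals(seq):
--     lg = []
--     ig = None
--     for i in range(len(seq)):
--         if seq[i] == '-' and ig is None:  # Start a new gap interval
--             ig = {'start': i}
--         elif seq[i] != '-' and ig is not None:  # End current gap interval
--             ig['end'] = i - 1
--             ig['length'] = ig['end'] - ig['start'] + 1
--             lg.append(ig)
--             ig = None
--     # Handle terminal gap
--     if ig is not None:
--         ig['end'] = len(seq) - 1
--         ig['length'] = ig['end'] - ig['start'] + 1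
--         lg.append(ig)
--     return lg
-- ===== SOURCE B (Python) =====
-- def compute_gap_intervals(seq):
--     # Run-based scan: slice off one maximal run of equal gap-ness at a time.
--     chars = list(seq)
--     lg = []
--     idx = 0
--     while chars:
--         is_gap = chars[0] == '-'
--         run = 1
--         while run < len(chars) and (chars[run] == '-') == is_gap:
--             run += 1
--         if is_gap:
--             lg.append({'start': idx, 'end': idx + run - 1, 'length': run})
--         idx += run
--         chars = chars[run:]
--     return lg
-- ===== Notes on version B (the rewrite author's own statement) =====
-- stated objective: alternative
-- what changed: Replaced A's one-character-at-a-time open/close state machine (pending-gap dict threaded through the loop plus a terminal flush) by a run-based scan that consumes each maximal run of gap/non-gap characters at once and emits a complete interval dict per gap run, with no pending state and no terminal special case.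
import Mathlib
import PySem

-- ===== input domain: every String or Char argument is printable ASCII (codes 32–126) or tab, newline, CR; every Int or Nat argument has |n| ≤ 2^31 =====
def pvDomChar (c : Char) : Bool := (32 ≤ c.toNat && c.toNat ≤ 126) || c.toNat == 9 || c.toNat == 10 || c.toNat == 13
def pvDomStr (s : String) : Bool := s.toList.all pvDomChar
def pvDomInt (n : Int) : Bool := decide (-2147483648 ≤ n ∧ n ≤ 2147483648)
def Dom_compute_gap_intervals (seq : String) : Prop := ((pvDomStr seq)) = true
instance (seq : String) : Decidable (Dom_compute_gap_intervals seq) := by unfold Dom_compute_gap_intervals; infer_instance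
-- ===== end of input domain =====

-- B replaces A's per-character open/close state machine with a run-based scan (same cost, no pending state).

-- ===== PORT A =====
-- A-side helper: the loop body; ig=None modelled as Option Int holding the 'start' value of the pending dict
def aStep (cs : List Char) (st : List (List (String × Int)) × Option Int) (i : Int) :
    List (List (String × Int)) × Option Int :=
  let c := PySem.List.pyGetD cs i ' '   -- seq[i]; i ∈ range(len(seq)) is always in range
  if c == '-' && st.2.isNone then (st.1, some i)
  else if !(c == '-') && st.2.isSome then
    (st.1 ++ [[("start", st.2.getD 0), ("end", i - 1), ("length", (i - 1) - st.2.getD 0 + 1)]], none)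
  else st

def compute_gap_intervals (seq : String) : List (List (String × Int)) :=
  let cs := seq.toList
  let fin := (PySem.List.pyRange 0 (cs.length : Int) 1).foldl (aStep cs) ([], none)
  match fin.2 with
  | some s => fin.1 ++ [[("start", s), ("end", (cs.length : Int) - 1), ("length", ((cs.length : Int) - 1) - s + 1)]]
  | none => fin.1

-- ===== PORT B =====
-- B-side helper: Source B's while loop; each step consumes one maximal run (chars = chars[run:])
def altGo (cs : List Char) (idx : Int) : List (List (String × Int)) :=
  match cs with
  | [] => []
  | c :: rest =>
    let run := rest.takeWhile (fun d => (d == '-') == (c == '-'))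
    let k : Int := 1 + run.length
    (if c == '-' then [[("start", idx), ("end", idx + k - 1), ("length", k)]] else [])
      ++ altGo (rest.drop run.length) (idx + k)
termination_by cs.length
decreasing_by simp

def compute_gap_intervals_alt (seq : String) : List (List (String × Int)) :=
  altGo seq.toList 0

-- ===== PRECONDITION & SPEC =====
def Spec_compute_gap_intervals (seq : String) (out : List (List (String × Int))) : Prop := out = compute_gap_intervals_alt seq
instance (seq : String) (out : List (List (String × Int))) : Decidable (Spec_compute_gap_intervals seq out) := by unfold Spec_compute_gap_intervals; infer_instance

-- ===== CLAIM (what is proved, stated in full; the proofs are below) =====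
def Claim_equal_compute_gap_intervals : Prop := ∀ (seq : String), Dom_compute_gap_intervals seq → Spec_compute_gap_intervals seq (compute_gap_intervals seq)

-- ===== LEMMAS AND PROOFS =====

-- A's loop body acting on the current character directly (instead of by index)
def aStepC (c : Char) (i : Int) (st : List (List (String × Int)) × Option Int) :
    List (List (String × Int)) × Option Int :=
  if c == '-' && st.2.isNone then (st.1, some i)
  else if !(c == '-') && st.2.isSome then
    (st.1 ++ [[("start", st.2.getD 0), ("end", i - 1), ("length", (i - 1) - st.2.getD 0 + 1)]], none)
  else st

-- A's loop as structural recursion over the remaining suffix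
def aGo (ds : List Char) (j : Int) (st : List (List (String × Int)) × Option Int) :
    List (List (String × Int)) × Option Int :=
  match ds with
  | [] => st
  | c :: rest => aGo rest (j + 1) (aStepC c j st)

-- A's terminal flush
def aDone (st : List (List (String × Int)) × Option Int) (n : Int) : List (List (String × Int)) :=
  match st.2 with
  | some s => st.1 ++ [[("start", s), ("end", n - 1), ("length", (n - 1) - s + 1)]]
  | none => st.1

lemma fold_eq (cs : List Char) : ∀ (m j : Nat) (st : List (List (String × Int)) × Option Int),
    cs.length - j ≤ m →
    (PySem.List.pyRange (j : Int) (cs.length : Int) 1).foldl (aStep cs) st = aGo (cs.drop j) j st := by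
  intro m
  induction m with
  | zero =>
    intro j st h
    have hj : cs.length ≤ j := by omega
    rw [PySem.List.pyRange_one_eq_nil (by exact_mod_cast hj), List.drop_eq_nil_of_le hj]
    simp [aGo]
  | succ m ih =>
    intro j st h
    by_cases hj : j < cs.length
    · rw [PySem.List.pyRange_one_cons (by exact_mod_cast hj)]
      have hdrop : cs.drop j = cs[j] :: cs.drop (j + 1) := List.drop_eq_getElem_cons hj
      rw [hdrop]
      simp only [List.foldl_cons, aGo]
      have hstep : aStep cs st (j : Int) = aStepC cs[j] (j : Int) st := by
        simp [aStep, aStepC, PySem.List.pyGetD_natCast, List.getD_eq_getElem?_getD,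
          List.getElem?_eq_getElem hj]
      rw [hstep]
      have : ((j : Int) + 1) = ((j + 1 : Nat) : Int) := by push_cast; ring
      rw [this, ih (j + 1) _ (by omega)]
    · have hj' : cs.length ≤ j := by omega
      rw [PySem.List.pyRange_one_eq_nil (by exact_mod_cast hj'), List.drop_eq_nil_of_le hj']
      simp [aGo]

-- B skips a non-gap head one character at a time
lemma altGo_cons_nongap (c : Char) (rest : List Char) (j : Int) (hc : ¬ (c == '-') = true) :
    altGo (c :: rest) j = altGo rest (j + 1) := by
  have hc' : (c == '-') = false := by simpa using hc
  rw [altGo, if_neg (by simp [hc'])]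
  simp only [List.nil_append]
  cases rest with
  | nil =>
    rw [altGo]; rw [show List.takeWhile (fun d => (d == '-') == (c == '-')) [] = [] from rfl]
    simp only [List.length_nil, Nat.cast_zero, add_zero, List.drop_nil]
    rw [altGo]
  | cons d rest' =>
    by_cases hd : (d == '-') = true
    · rw [List.takeWhile_cons_of_neg (by simp [hc', hd])]
      simp
    · have hd' : (d == '-') = false := by simpa using hd
      rw [List.takeWhile_cons_of_pos (by simp [hc', hd'])]
      conv_rhs => rw [altGo]
      rw [if_neg (by simp [hd'])]
      have hsame : (fun e => (e == '-') == (c == '-')) = (fun e => (e == '-') == (d == '-')) := by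
        funext e; rw [hc', hd']
      simp only [List.nil_append, List.length_cons, List.drop_succ_cons, hsame]
      congr 1
      push_cast; ring

lemma emit1 (lg x1 x2 : List (List (String × Int))) (s e1 l1 e2 l2 : Int)
    (he : e1 = e2) (hl : l1 = l2) (hx : x1 = x2) :
    lg ++ [[("start", s), ("end", e1), ("length", l1)]] ++ x1
      = lg ++ ([[("start", s), ("end", e2), ("length", l2)]] ++ x2) := by
  subst he; subst hl; subst hx; simp [List.append_assoc]

lemma emit2 (lg x1 x2 : List (List (String × Int))) (s e1 l1 e2 l2 : Int)
    (he : e1 = e2) (hl : l1 = l2) (hx : x1 = x2) :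
    lg ++ [[("start", s), ("end", e1), ("length", l1)]] ++ x1
      = lg ++ [[("start", s), ("end", e2), ("length", l2)]] ++ x2 := by
  subst he; subst hl; subst hx; rfl

-- the main invariant: running A's machine then flushing equals B's run-scan
lemma main_inv : ∀ (ds : List Char),
    (∀ (j : Int) (lg : List (List (String × Int))),
        aDone (aGo ds j (lg, none)) (j + ds.length) = lg ++ altGo ds j) ∧
    (∀ (j : Int) (lg : List (List (String × Int))) (s : Int),
        aDone (aGo ds j (lg, some s)) (j + ds.length) =
          lg ++ [[("start", s), ("end", j + ((ds.takeWhile (· == '-')).length : Int) - 1),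
                  ("length", j + ((ds.takeWhile (· == '-')).length : Int) - s)]] ++
            altGo (ds.drop (ds.takeWhile (· == '-')).length)
              (j + ((ds.takeWhile (· == '-')).length : Int))) := by
  intro ds
  induction ds with
  | nil =>
    have haltnil : ∀ t : Int, altGo [] t = [] := fun t => by rw [altGo]
    constructor
    · intro j lg; simp [aGo, aDone, haltnil]
    · intro j lg s
      simp only [aGo, aDone, haltnil, List.takeWhile_nil, List.length_nil, Nat.cast_zero,
        add_zero, List.drop_nil, List.append_nil, List.length_nil]
      have e : j - 1 - s + 1 = j - s := by ring
      rw [e]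
  | cons c rest ih =>
    obtain ⟨ih1, ih2⟩ := ih
    have hlen : ∀ j : Int, j + (((c :: rest).length : Nat) : Int) = (j + 1) + (rest.length : Int) := by
      intro j; push_cast [List.length_cons]; ring
    constructor
    · intro j lg
      by_cases hc : (c == '-') = true
      · -- open a new gap at j
        have hst : aStepC c j ((lg, none) : List (List (String × Int)) × Option Int) = (lg, some j) := by
          simp [aStepC, hc]
        rw [aGo, hst, hlen, ih2 (j + 1) lg j, altGo, if_pos hc]
        have hpred : (fun d => (d == '-') == (c == '-')) = (fun d : Char => d == '-') := by
          funext d; rw [hc]; cases d == '-' <;> rfl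
        rw [hpred]
        exact emit1 _ _ _ _ _ _ _ _ (by ring) (by ring) (by congr 1; ring)
      · -- non-gap head with no pending gap: state unchanged
        have hst : aStepC c j ((lg, none) : List (List (String × Int)) × Option Int) = (lg, none) := by
          simp [aStepC, hc]
        rw [aGo, hst, hlen, ih1 (j + 1) lg, altGo_cons_nongap c rest j hc]
    · intro j lg s
      by_cases hc : (c == '-') = true
      · -- pending gap continues through a dash
        have hst : aStepC c j ((lg, some s) : List (List (String × Int)) × Option Int) = (lg, some s) := by
          simp [aStepC, hc]
        rw [aGo, hst, hlen, ih2 (j + 1) lg s]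
        have htw : (c :: rest).takeWhile (· == '-') = c :: rest.takeWhile (· == '-') := by
          simp [hc]
        rw [htw]
        simp only [List.length_cons, List.drop_succ_cons]
        exact emit2 _ _ _ _ _ _ _ _ (by push_cast; ring) (by push_cast; ring)
          (by congr 1; push_cast; ring)
      · -- non-gap head closes the pending gap at j-1
        have hst : aStepC c j ((lg, some s) : List (List (String × Int)) × Option Int) =
            (lg ++ [[("start", s), ("end", j - 1), ("length", (j - 1) - s + 1)]], none) := by
          simp [aStepC, hc]
        rw [aGo, hst, hlen, ih1 (j + 1) _]
        have htw : (c :: rest).takeWhile (· == '-') = [] := by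
          simp [hc]
        rw [htw]
        simp only [List.length_nil, List.drop_zero, Nat.cast_zero, add_zero]
        rw [altGo_cons_nongap c rest j hc]
        simp only [List.append_assoc, List.singleton_append]
        have e : j - 1 - s + 1 = j - s := by ring
        rw [e]

-- ===== VERDICT (by name: the statement is the Claim_ definition above) =====
theorem compute_gap_intervals_spec : Claim_equal_compute_gap_intervals := by
  intro seq _
  unfold Spec_compute_gap_intervals compute_gap_intervals compute_gap_intervals_alt
  set cs := seq.toList with hcs
  have h1 : (PySem.List.pyRange (0 : Int) (cs.length : Int) 1).foldl (aStep cs) ([], none) =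
      aGo cs 0 ([], none) := by
    have := fold_eq cs cs.length 0 ([], none) (by omega)
    simpa using this
  have h2 := (main_inv cs).1 0 []
  simp only [zero_add] at h2
  simp only [h1]
  have : aDone (aGo cs 0 ([], none)) (cs.length : Int) = altGo cs 0 := by simpa using h2
  rw [← this]
  unfold aDone
  rcases aGo cs 0 ([], none) with ⟨lg, ig⟩
  cases ig <;> rfl
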